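-- pv_equiv track=rewrite | github.com/OGalOz/OGUtl | final_transfer/CreateTrieJSON.py | lc_words_to_all_versions
-- ===== SOURCE A (Python) =====
-- def lc_words_to_all_versions(word_list):
--     lc2all = {}
--     for W in word_list:
--         w = W.lower()
--         if w in lc2all:
--             lc2all[w].append(W)
--         else:
--             lc2all[w] = [W]
--     return lc2all
-- ===== SOURCE B (Python) =====
-- def lc_words_to_all_versions(word_list):
--     lowers = [W.lower() for W in word_list]
--     return {w: [W for W, l in zip(word_list, lowers) if l == w]
--             for w in dict.fromkeys(lowers)}
-- ===== Notes on version B (the rewrite author's own statement) =====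
-- stated objective: alternative
-- what changed: Replaces A's single incremental dict-building pass (append-or-create per word) with a two-phase plan: compute the distinct lowercase keys in first-seen order, then build each group by one filtering comprehension over the zipped word/lowercase lists.
import Mathlib
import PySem

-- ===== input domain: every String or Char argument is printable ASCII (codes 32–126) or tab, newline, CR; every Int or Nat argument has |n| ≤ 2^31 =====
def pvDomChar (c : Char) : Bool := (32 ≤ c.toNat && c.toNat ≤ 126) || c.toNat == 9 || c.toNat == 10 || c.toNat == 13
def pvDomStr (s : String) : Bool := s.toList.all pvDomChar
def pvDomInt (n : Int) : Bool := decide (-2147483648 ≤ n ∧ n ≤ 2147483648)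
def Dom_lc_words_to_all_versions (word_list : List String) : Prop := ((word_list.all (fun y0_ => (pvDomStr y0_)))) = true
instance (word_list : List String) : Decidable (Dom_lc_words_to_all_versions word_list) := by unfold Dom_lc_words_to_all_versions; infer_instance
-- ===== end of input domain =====

-- B replaces A's incremental dict-building pass by a two-phase plan (distinct lowercase
-- keys first, then one filtering pass per key); alternative decomposition, not faster.

-- ===== PORT A =====
-- incremental build: for W: w = W.lower(); append to existing group or create [W]
def lc_words_to_all_versions (word_list : List String) : List (String × List String) :=
  (word_list.foldl (fun d W =>
      let w := PySem.Str.lower W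
      match d.get? w with
      | some v => d.insert w (v ++ [W])
      | none   => d.insert w [W])
    PySem.Dict.empty).items

-- ===== PORT B =====
-- lowers = [W.lower() for W in word_list]; {w: [W for W, l in zip(word_list, lowers) if l == w] for w in dict.fromkeys(lowers)}
def lc_words_to_all_versions_alt (word_list : List String) : List (String × List String) :=
  let lowers := word_list.map PySem.Str.lower
  (PySem.List.dedup lowers).map (fun w =>
    (w, ((word_list.zip lowers).filter (fun p => p.2 == w)).map Prod.fst))

-- ===== PRECONDITION & SPEC =====
def Spec_lc_words_to_all_versions (word_list : List String) (out : List (String × List String)) : Prop := out = lc_words_to_all_versions_alt word_list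
instance (word_list : List String) (out : List (String × List String)) : Decidable (Spec_lc_words_to_all_versions word_list out) := by unfold Spec_lc_words_to_all_versions; infer_instance

-- ===== CLAIM (what is proved, stated in full; the proofs are below) =====
def Claim_equal_lc_words_to_all_versions : Prop := ∀ (word_list : List String), Dom_lc_words_to_all_versions word_list → Spec_lc_words_to_all_versions word_list (lc_words_to_all_versions word_list)

-- ===== LEMMAS AND PROOFS =====

-- a Nodup-keyed dict's items are its keys paired with their looked-up values
theorem dict_items_eq_keys_map {κ ν : Type} [BEq κ] [LawfulBEq κ]
    (d : PySem.Dict κ ν) (d0 : ν) (h : d.keys.Nodup) :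
    d.items = d.keys.map (fun k => (k, d.getD k d0)) := by
  have hk : d.keys = d.items.map Prod.fst := by simp [PySem.Dict.keys]
  rw [hk, List.map_map]
  conv_lhs => rw [← List.map_id d.items]
  apply List.map_congr_left
  intro p hp
  have hv := PySem.Dict.getD_of_mem_items (d := d) (k := p.1) (v := p.2) (by simpa using hp) h d0
  simp [hv]

theorem zip_map_self {α β : Type} (f : α → β) (l : List α) :
    l.zip (l.map f) = l.map (fun x => (x, f x)) := by
  induction l with
  | nil => rfl
  | cons h t ih => simp [ih]

theorem lc_words_spec_aux (word_list : List String) :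
    lc_words_to_all_versions word_list = lc_words_to_all_versions_alt word_list := by
  simp only [lc_words_to_all_versions, lc_words_to_all_versions_alt]
  -- A's branching step is exactly a `modify` with default []
  have hstep :
      word_list.foldl (fun d W =>
        let w := PySem.Str.lower W
        match d.get? w with
        | some v => d.insert w (v ++ [W])
        | none   => d.insert w [W]) PySem.Dict.empty
      = word_list.foldl (fun d W => d.modify (PySem.Str.lower W) [] (· ++ [W]))
          PySem.Dict.empty := by
    apply PySem.List.foldl_congr_mem
    intro d W _
    simp only [PySem.Dict.modify, PySem.Dict.getD_eq_get?_getD]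
    cases d.get? (PySem.Str.lower W) <;> simp
  rw [hstep]
  -- the modify loop over words is the modify loop over (lower W, W) pairs
  have hmap :
      word_list.foldl (fun d W => d.modify (PySem.Str.lower W) [] (· ++ [W]))
          PySem.Dict.empty
      = (word_list.map (fun W => (PySem.Str.lower W, W))).foldl
          (fun d p => d.modify p.1 [] (· ++ [p.2])) PySem.Dict.empty := by
    rw [List.foldl_map]
  rw [hmap]
  set D := (word_list.map (fun W => (PySem.Str.lower W, W))).foldl
      (fun d p => d.modify p.1 [] (· ++ [p.2])) PySem.Dict.empty with hD
  have hnodup : D.keys.Nodup := by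
    rw [hD, List.foldl_map]
    exact PySem.Dict.nodup_keys_foldl_modify_key _ _ _ _ _ (by simp)
  have hkeys : D.keys = PySem.Set.ofList (word_list.map PySem.Str.lower) := by
    rw [hD, List.foldl_map,
      PySem.Dict.keys_foldl_modify_key word_list PySem.Str.lower [] (fun _ W => (· ++ [W]))]
    rfl
  rw [dict_items_eq_keys_map D [] hnodup, hkeys]
  have hded : PySem.List.dedup (word_list.map PySem.Str.lower)
      = PySem.Set.ofList (word_list.map PySem.Str.lower) := rfl
  rw [hded]
  apply List.map_congr_left
  intro k _
  have hget : D.getD k []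
      = ((word_list.map (fun W => (PySem.Str.lower W, W))).filter
          (fun p => p.1 == k)).map Prod.snd := by
    rw [hD, PySem.Dict.getD_foldl_modify_append]
    simp
  have hzip : word_list.zip (word_list.map PySem.Str.lower)
      = word_list.map (fun W => (W, PySem.Str.lower W)) :=
    zip_map_self PySem.Str.lower word_list
  rw [hget, hzip]
  simp [List.filter_map, List.map_map, Function.comp_def]

-- ===== VERDICT (by name: the statement is the Claim_ definition above) =====
theorem lc_words_to_all_versions_spec : Claim_equal_lc_words_to_all_versions := by
  intro word_list _
  unfold Spec_lc_words_to_all_versions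
  exact lc_words_spec_aux word_list
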